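-- pv_equiv track=rewrite | github.com/tokintmash/macros | ZOO/LibreOffice/Set1stLine.py | adjust_lines
-- ===== SOURCE A (Python) =====
-- def adjust_lines(first_line, second_line):
--     words = second_line.split()
--     for word in words:
--         new_first_line = first_line + " " + word
--         if len(new_first_line.strip()) <= 42 and len(new_first_line.strip()) <= len(second_line.strip()):
--             first_line = new_first_line
--             second_line = ' '.join(words[1:])
--         else:
--             break
--         words = second_line.split()  # Re-split after modification
--     return first_line.strip(), second_line.strip()
-- ===== SOURCE B (Python) =====
-- def adjust_lines(first_line, second_line):
--     words = second_line.split()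
--     if not words:
--         return first_line.strip(), second_line.strip()
--     n = len(words)
--     # pre[i] = length of words[:i] counting one joining space per word
--     pre = [0]
--     total = 0
--     for w in words:
--         total += len(w) + 1
--         pre.append(total)
--     first_with_one = len((first_line + " " + words[0]).strip())
--
--     def width(i):  # length of the first line once words[:i] sit on it (i >= 1)
--         return first_with_one + pre[i] - pre[1]
--
--     def source(i):  # length of the line that still holds words[i:]
--         return len(second_line.strip()) if i == 0 else pre[n] - pre[i] - 1
--
--     def fits(i):  # words[:i] all fit on the first line
--         return width(i) <= 42 and width(i) <= source(i - 1)
--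
--     # width grows and source shrinks as i grows, so fits is monotone:
--     # binary search for the largest k with fits(k).
--     lo, hi = 0, n
--     while lo < hi:
--         mid = (lo + hi + 1) // 2
--         if fits(mid):
--             lo = mid
--         else:
--             hi = mid - 1
--     k = lo
--     if k == 0:
--         return first_line.strip(), second_line.strip()
--     return (first_line + " " + " ".join(words[:k])).strip(), " ".join(words[k:])
-- ===== Notes on version B (the rewrite author's own statement) =====
-- stated objective: alternative
-- what changed: A greedily grows the first line word by word, re-joining and re-splitting the whole remaining line after every moved word; B precomputes prefix sums of the word lengths, expresses the fit test for 'the first k words move' arithmetically, and binary-searches for the largest k for which it holds (the test is monotone since the first line only grows and the remainder only shrinks), then assembles both lines once.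
import Mathlib
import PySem

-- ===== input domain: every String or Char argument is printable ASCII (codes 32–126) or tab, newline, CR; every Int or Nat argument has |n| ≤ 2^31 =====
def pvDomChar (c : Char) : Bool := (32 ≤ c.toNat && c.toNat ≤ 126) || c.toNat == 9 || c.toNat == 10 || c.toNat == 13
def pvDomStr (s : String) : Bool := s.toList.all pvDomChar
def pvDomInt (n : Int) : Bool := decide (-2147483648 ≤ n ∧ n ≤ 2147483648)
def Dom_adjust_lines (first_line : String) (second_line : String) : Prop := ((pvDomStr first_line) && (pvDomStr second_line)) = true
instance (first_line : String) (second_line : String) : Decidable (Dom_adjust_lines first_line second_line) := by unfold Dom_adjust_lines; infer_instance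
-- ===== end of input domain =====

-- B replaces A's greedy loop (which re-joins and re-splits the remainder after every moved word)
-- by prefix sums of the word lengths plus a binary search for the number of movable words
-- (the fit predicate is monotone); objective: alternative.

-- ===== PORT A =====
-- the for-loop: iterates over the ORIGINAL word list (Python's iterator is fixed at loop entry),
-- while the names first_line/second_line/words are reassigned inside; break → return.
def pvALoop : List String → String → String → List String → String × String
  | [], fl, sl, _ => (fl, sl)
  | word :: rest, fl, sl, ws =>
    let nf := fl ++ " " ++ word
    if PySem.Str.len (PySem.Str.strip nf) ≤ 42 ∧
       PySem.Str.len (PySem.Str.strip nf) ≤ PySem.Str.len (PySem.Str.strip sl) then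
      let sl' := PySem.Str.join " " (PySem.List.slice ws (some 1) none)
      pvALoop rest nf sl' (PySem.Str.split₀ sl')
    else (fl, sl)

def adjust_lines (first_line : String) (second_line : String) : String × String :=
  let words := PySem.Str.split₀ second_line
  let r := pvALoop words first_line second_line words
  (PySem.Str.strip r.1, PySem.Str.strip r.2)

-- ===== PORT B =====
-- Source B's prefix-sum loop: pre grows by len(w)+1 per word, total is the running sum.
def pvPreLoop : List String → List Int → Int → List Int × Int
  | [], pre, total => (pre, total)
  | w :: rest, pre, total =>
    pvPreLoop rest (pre ++ [total + PySem.Str.len w + 1]) (total + PySem.Str.len w + 1)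

-- Source B's width(i): indices are Nats and always in range, so pre[i] is List.getD (exact here)
def pvWidth (fwo : Int) (pre : List Int) (i : Nat) : Int :=
  fwo + pre.getD i 0 - pre.getD 1 0

-- Source B's source(i)
def pvSource (slen : Int) (pre : List Int) (n : Nat) (i : Nat) : Int :=
  if i = 0 then slen else pre.getD n 0 - pre.getD i 0 - 1

-- Source B's fits(i)
def pvFits (fwo slen : Int) (pre : List Int) (n : Nat) (i : Nat) : Bool :=
  decide (pvWidth fwo pre i ≤ 42) && decide (pvWidth fwo pre i ≤ pvSource slen pre n (i - 1))

-- Source B's binary-search while-loop; lo, hi stay ≥ 0 and mid ≥ 1, so Nat arithmetic is exact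
def pvBS (fits : Nat → Bool) (lo hi : Nat) : Nat :=
  if lo < hi then
    -- mid = (lo + hi + 1) // 2, written inline
    if fits ((lo + hi + 1) / 2) then pvBS fits ((lo + hi + 1) / 2) hi
    else pvBS fits lo ((lo + hi + 1) / 2 - 1)
  else lo
termination_by hi - lo
decreasing_by all_goals omega

def adjust_lines_alt (first_line : String) (second_line : String) : String × String :=
  let words := PySem.Str.split₀ second_line
  if words.isEmpty then
    (PySem.Str.strip first_line, PySem.Str.strip second_line)
  else
    let n := words.length
    let pre := (pvPreLoop words [0] 0).1
    -- words[0] is in range (words nonempty), so headD is exact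
    let fwo := PySem.Str.len (PySem.Str.strip (first_line ++ " " ++ words.headD ""))
    let slen := PySem.Str.len (PySem.Str.strip second_line)
    let k := pvBS (pvFits fwo slen pre n) 0 n
    if k = 0 then (PySem.Str.strip first_line, PySem.Str.strip second_line)
    else
      -- words[:k] / words[k:] with k ≥ 0: take / drop are exact
      (PySem.Str.strip (first_line ++ " " ++ PySem.Str.join " " (words.take k)),
       PySem.Str.join " " (words.drop k))

-- ===== PRECONDITION & SPEC =====
def Spec_adjust_lines (first_line : String) (second_line : String) (out : String × String) : Prop := out = adjust_lines_alt first_line second_line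
instance (first_line : String) (second_line : String) (out : String × String) : Decidable (Spec_adjust_lines first_line second_line out) := by unfold Spec_adjust_lines; infer_instance

-- ===== CLAIM (what is proved, stated in full; the proofs are below) =====
def Claim_equal_adjust_lines : Prop := ∀ (first_line : String) (second_line : String), Dom_adjust_lines first_line second_line → Spec_adjust_lines first_line second_line (adjust_lines first_line second_line)

-- ===== LEMMAS AND PROOFS =====

-- a "word" as produced by str.split(): nonempty, no whitespace characters
def pvWord (w : String) : Prop := w.toList ≠ [] ∧ ∀ c ∈ w.toList, PySem.Chars.isspace c = false

-- length of ' '.join(ws) (= -1 on [])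
def pvLenJ (ws : List String) : Int := (ws.map PySem.Str.len).sum + ws.length - 1

-- common reference: greedy scan returning (grown first line, untouched word suffix)
def pvRef : List String → String → String × List String
  | [], fl => (fl, [])
  | w :: rest, fl =>
    let nxt := fl ++ " " ++ w
    let t := PySem.Str.len (PySem.Str.strip nxt)
    if t ≤ 42 ∧ t ≤ pvLenJ (w :: rest) then pvRef rest nxt else (fl, w :: rest)

-- split() output consists of words
lemma pvGoWords (cs : List Char) : ∀ cur acc,
    (∀ c ∈ cur, PySem.Chars.isspace c = false) →
    (∀ w ∈ acc, w ≠ [] ∧ ∀ c ∈ w, PySem.Chars.isspace c = false) →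
    ∀ w ∈ PySem.Chars.split₀.go cs cur acc, w ≠ [] ∧ ∀ c ∈ w, PySem.Chars.isspace c = false := by
  induction cs with
  | nil =>
    intro cur acc hc ha w hw
    rw [PySem.Chars.split₀.go] at hw
    by_cases he : cur.isEmpty
    · simp [he] at hw; exact ha w hw
    · simp [he] at hw
      have hw' : w = cur.reverse ∨ w ∈ acc := by
        rcases hw with h | h
        · exact Or.inr h
        · exact Or.inl h
      rcases hw' with h | h
      · subst h
        refine ⟨by simpa [List.isEmpty_iff] using he, ?_⟩
        intro c hc'; exact hc c (List.mem_reverse.mp hc')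
      · exact ha w h
  | cons c rest ih =>
    intro cur acc hc ha w hw
    rw [PySem.Chars.split₀.go] at hw
    by_cases hs : PySem.Chars.isspace c
    · by_cases he : cur.isEmpty
      · simp only [hs, he, if_true] at hw
        exact ih [] acc (by simp) ha w hw
      · simp only [hs, he, if_true, Bool.false_eq_true, if_false] at hw
        refine ih [] _ (by simp) ?_ w hw
        intro u hu
        rcases List.mem_cons.mp hu with h | h
        · subst h
          exact ⟨by simpa [List.isEmpty_iff] using he, fun d hd => hc d (List.mem_reverse.mp hd)⟩
        · exact ha u h
    · simp only [hs, Bool.false_eq_true, if_false] at hw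
      refine ih (c :: cur) acc ?_ ha w hw
      intro d hd
      rcases List.mem_cons.mp hd with h | h
      · subst h; simpa using hs
      · exact hc d h

lemma pvSplitWords (s : String) : ∀ w ∈ PySem.Str.split₀ s, pvWord w := by
  intro w hw
  simp only [PySem.Str.split₀, List.mem_map] at hw
  obtain ⟨u, hu, rfl⟩ := hw
  have := pvGoWords s.toList [] [] (by simp) (by simp) u (by simpa [PySem.Chars.split₀] using hu)
  exact ⟨by simpa [String.toList_ofList] using this.1, by simpa [String.toList_ofList] using this.2⟩

-- go consumes a block of non-space characters
lemma pvGoBlock (w : List Char) (hw : ∀ c ∈ w, PySem.Chars.isspace c = false) :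
    ∀ rest cur acc, PySem.Chars.split₀.go (w ++ rest) cur acc
      = PySem.Chars.split₀.go rest (w.reverse ++ cur) acc := by
  induction w with
  | nil => intro rest cur acc; simp
  | cons c w' ih =>
    intro rest cur acc
    have hc : PySem.Chars.isspace c = false := hw c (by simp)
    rw [List.cons_append, PySem.Chars.split₀.go, hc]
    simp only [Bool.false_eq_true, if_false]
    rw [ih (fun d hd => hw d (by simp [hd])) rest (c :: cur) acc]
    simp

-- split(join(ws)) = ws for word lists (chars level)
lemma pvGoJoin (cl : List (List Char))
    (h : ∀ w ∈ cl, w ≠ [] ∧ ∀ c ∈ w, PySem.Chars.isspace c = false) :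
    ∀ acc, PySem.Chars.split₀.go (PySem.Chars.join [' '] cl) [] acc = acc.reverse ++ cl := by
  induction cl with
  | nil => intro acc; rw [PySem.Chars.join_nil, PySem.Chars.split₀.go]; simp
  | cons w tail ih =>
    intro acc
    obtain ⟨hwne, hwns⟩ := h w (by simp)
    cases tail with
    | nil =>
      rw [PySem.Chars.join_singleton, ← List.append_nil w, pvGoBlock w hwns [] [] acc,
        PySem.Chars.split₀.go]
      simp [List.isEmpty_iff, hwne]
    | cons x rest =>
      rw [PySem.Chars.join_cons_cons, List.append_assoc,
        pvGoBlock w hwns _ [] acc]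
      have : [' '] ++ PySem.Chars.join [' '] (x :: rest) = ' ' :: PySem.Chars.join [' '] (x :: rest) := rfl
      rw [this, PySem.Chars.split₀.go]
      have hsp : PySem.Chars.isspace ' ' = true := by decide
      rw [hsp]
      simp only [if_true, List.append_nil, List.isEmpty_iff, List.reverse_eq_nil_iff]
      rw [if_neg hwne, ih (fun u hu => h u (by simp [hu])) _]
      simp

lemma pvJoinSplit (ws : List String) (h : ∀ w ∈ ws, pvWord w) :
    PySem.Str.split₀ (PySem.Str.join " " ws) = ws := by
  simp only [PySem.Str.split₀, PySem.Str.join, String.toList_ofList]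
  have hsep : (" " : String).toList = [' '] := rfl
  rw [hsep, PySem.Chars.split₀, pvGoJoin (ws.map String.toList)
    (by intro u hu; simp only [List.mem_map] at hu; obtain ⟨v, hv, rfl⟩ := hu; exact h v hv) []]
  simp [List.map_map, Function.comp_def, String.ofList_toList]

-- strip(join(ws)) = join(ws) for word lists
lemma pvJoinNeNil (x : List Char) (rest : List (List Char)) (hx : x ≠ []) :
    PySem.Chars.join [' '] (x :: rest) ≠ [] := by
  cases rest with
  | nil => simpa [PySem.Chars.join_singleton] using hx
  | cons y r => rw [PySem.Chars.join_cons_cons]; simp [hx]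

lemma pvJoinLast (cl : List (List Char))
    (h : ∀ w ∈ cl, w ≠ [] ∧ ∀ c ∈ w, PySem.Chars.isspace c = false) :
    ∀ c, (PySem.Chars.join [' '] cl).getLast? = some c → PySem.Chars.isspace c = false := by
  induction cl with
  | nil => intro c hc; rw [PySem.Chars.join_nil] at hc; simp at hc
  | cons w tail ih =>
    intro c hc
    obtain ⟨hwne, hwns⟩ := h w (by simp)
    cases tail with
    | nil =>
      rw [PySem.Chars.join_singleton] at hc
      exact hwns c (List.mem_of_getLast? hc)
    | cons x rest =>
      rw [PySem.Chars.join_cons_cons] at hc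
      have hxne := pvJoinNeNil x rest (h x (by simp)).1
      rw [List.getLast?_append_of_ne_nil _ hxne] at hc
      exact ih (fun u hu => h u (by simp [hu])) c hc

lemma pvDropWhileEq (l : List Char) (h : ∀ c, l.head? = some c → PySem.Chars.isspace c = false) :
    l.dropWhile PySem.Chars.isspace = l := by
  cases l with
  | nil => rfl
  | cons a t => rw [List.dropWhile_cons, h a rfl]; simp

lemma pvJoinHead (cl : List (List Char))
    (h : ∀ w ∈ cl, w ≠ [] ∧ ∀ c ∈ w, PySem.Chars.isspace c = false) :
    ∀ c, (PySem.Chars.join [' '] cl).head? = some c → PySem.Chars.isspace c = false := by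
  intro c hc
  cases cl with
  | nil => rw [PySem.Chars.join_nil] at hc; simp at hc
  | cons w tail =>
    obtain ⟨hwne, hwns⟩ := h w (by simp)
    have hj : (PySem.Chars.join [' '] (w :: tail)).head? = w.head? := by
      cases tail with
      | nil => rw [PySem.Chars.join_singleton]
      | cons x rest =>
        rw [PySem.Chars.join_cons_cons]
        rw [List.head?_append_of_ne_nil, List.head?_append_of_ne_nil] <;> simp [hwne]
    rw [hj] at hc
    exact hwns c (by cases w with | nil => simp at hc | cons a t => simp at hc; subst hc; simp)

lemma pvStripJoinChars (cl : List (List Char))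
    (h : ∀ w ∈ cl, w ≠ [] ∧ ∀ c ∈ w, PySem.Chars.isspace c = false) :
    PySem.Chars.strip (PySem.Chars.join [' '] cl) = PySem.Chars.join [' '] cl := by
  rw [PySem.Chars.strip, PySem.Chars.lstrip, pvDropWhileEq _ (pvJoinHead cl h),
    PySem.Chars.rstrip, pvDropWhileEq, List.reverse_reverse]
  intro c hc
  rw [List.head?_reverse] at hc
  exact pvJoinLast cl h c hc

-- length of the join, arithmetically
lemma pvLenJoinChars (cl : List (List Char)) (hne : cl ≠ []) :
    ((PySem.Chars.join [' '] cl).length : Int)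
      = (cl.map (fun w => (w.length : Int))).sum + cl.length - 1 := by
  induction cl with
  | nil => simp at hne
  | cons w tail ih =>
    cases tail with
    | nil => simp [PySem.Chars.join_singleton]
    | cons x rest =>
      rw [PySem.Chars.join_cons_cons]
      have := ih (by simp)
      simp only [List.length_append, List.map_cons, List.sum_cons, List.length_cons,
        List.length_nil] at *
      push_cast at *
      omega

lemma pvStripJoin (ws : List String) (h : ∀ w ∈ ws, pvWord w) :
    PySem.Str.strip (PySem.Str.join " " ws) = PySem.Str.join " " ws := by
  simp only [PySem.Str.strip, PySem.Str.join, String.toList_ofList]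
  have hsep : (" " : String).toList = [' '] := rfl
  rw [hsep, pvStripJoinChars (ws.map String.toList)
    (by intro u hu; simp only [List.mem_map] at hu; obtain ⟨v, hv, rfl⟩ := hu; exact h v hv)]

lemma pvLenJoin (ws : List String) (hne : ws ≠ []) :
    PySem.Str.len (PySem.Str.join " " ws) = pvLenJ ws := by
  simp only [PySem.Str.len, PySem.Str.join, String.toList_ofList, pvLenJ]
  have hsep : (" " : String).toList = [' '] := rfl
  rw [hsep, pvLenJoinChars (ws.map String.toList) (by simpa using hne)]
  simp only [List.map_map, Function.comp_def, List.length_map]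
  have : List.map (fun x : String => ((x.toList.length : Int))) ws = List.map PySem.Str.len ws :=
    List.map_congr_left (fun x _ => by simp [PySem.Str.len_eq])
  rw [this]

-- A's loop computes pvRef once the invariant (sl = join ws, ws = remaining suffix) holds
lemma pvALoopRef (ws : List String) (h : ∀ w ∈ ws, pvWord w) : ∀ fl,
    pvALoop ws fl (PySem.Str.join " " ws) ws
      = ((pvRef ws fl).1, PySem.Str.join " " (pvRef ws fl).2) := by
  induction ws with
  | nil => intro fl; simp [pvALoop, pvRef]
  | cons w rest ih =>
    intro fl
    have hrest : ∀ u ∈ rest, pvWord u := fun u hu => h u (by simp [hu])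
    have hslice : PySem.List.slice (w :: rest) (some 1) none = rest := by simp [pysem]
    simp only [pvALoop, pvRef]
    rw [pvStripJoin _ h, pvLenJoin _ (by simp)]
    split
    · rw [hslice, pvJoinSplit rest hrest, ih hrest]
    · rfl

-- ---------- string extensionality helper ----------
lemma pvStrExt {a b : String} (h : a.toList = b.toList) : a = b := by
  have := congrArg String.ofList h
  simpa [String.ofList_toList] using this

-- join over strings, cons and concat forms
lemma pvJoinStrCons (w x : String) (r : List String) :
    PySem.Str.join " " (w :: x :: r) = w ++ " " ++ PySem.Str.join " " (x :: r) := by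
  apply pvStrExt
  simp only [PySem.Str.join, String.toList_ofList, String.toList_append, List.map_cons]
  have hsep : (" " : String).toList = [' '] := rfl
  rw [hsep, PySem.Chars.join_cons_cons]

lemma pvJoinStrSingleton (w : String) : PySem.Str.join " " [w] = w := by
  apply pvStrExt
  simp only [PySem.Str.join, String.toList_ofList, List.map_cons, List.map_nil]
  have hsep : (" " : String).toList = [' '] := rfl
  rw [hsep, PySem.Chars.join_singleton]

lemma pvJoinStrConcat (ws : List String) (y : String) (h : ws ≠ []) :
    PySem.Str.join " " (ws ++ [y]) = PySem.Str.join " " ws ++ " " ++ y := by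
  induction ws with
  | nil => simp at h
  | cons w r ih =>
    cases r with
    | nil => rw [List.cons_append, List.nil_append, pvJoinStrCons, pvJoinStrSingleton, pvJoinStrSingleton]
    | cons x r' =>
      have ih' : PySem.Str.join " " (x :: (r' ++ [y]))
          = PySem.Str.join " " (x :: r') ++ " " ++ y := ih (by simp)
      have h2 : (x :: r') ++ [y] = x :: (r' ++ [y]) := rfl
      rw [List.cons_append, h2, pvJoinStrCons, ih', pvJoinStrCons]
      apply pvStrExt
      simp [String.toList_append]

-- ---------- prefix sums ----------
def pvP (ws : List String) (i : Nat) : Int := ((ws.take i).map (fun w => PySem.Str.len w + 1)).sum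

def pvSums : List String → Int → List Int
  | [], _ => []
  | w :: r, t => (t + PySem.Str.len w + 1) :: pvSums r (t + PySem.Str.len w + 1)

lemma pvPreLoopFst : ∀ (ws : List String) (pre : List Int) (t : Int),
    (pvPreLoop ws pre t).1 = pre ++ pvSums ws t := by
  intro ws
  induction ws with
  | nil => intro pre t; simp [pvPreLoop, pvSums]
  | cons w r ih => intro pre t; rw [pvPreLoop, pvSums, ih]; simp

lemma pvP_cons (w : String) (r : List String) (j : Nat) :
    pvP (w :: r) (j + 1) = PySem.Str.len w + 1 + pvP r j := by
  simp [pvP, List.take_succ_cons]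

lemma pvSumsGetD : ∀ (ws : List String) (t : Int) (i : Nat), i < ws.length →
    (pvSums ws t).getD i 0 = t + pvP ws (i + 1) := by
  intro ws
  induction ws with
  | nil => intro t i h; simp at h
  | cons w r ih =>
    intro t i h
    cases i with
    | zero => simp [pvSums, pvP]; ring
    | succ i' =>
      rw [pvSums]
      simp only [List.getD_cons_succ]
      rw [ih _ i' (by simpa using h), pvP_cons]
      ring

-- pre[i] = pvP ws i for i ≤ n
lemma pvPreGetD (ws : List String) (i : Nat) (h : i ≤ ws.length) :
    ((pvPreLoop ws [0] 0).1).getD i 0 = pvP ws i := by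
  rw [pvPreLoopFst]
  cases i with
  | zero => simp [pvP]
  | succ i' =>
    have : (((0 : Int) :: []) ++ pvSums ws 0).getD (i' + 1) 0 = (pvSums ws 0).getD i' 0 := by simp
    rw [show ([(0 : Int)] ++ pvSums ws 0) = (0 : Int) :: pvSums ws 0 from rfl]
    simp only [List.getD_cons_succ]
    rw [pvSumsGetD ws 0 i' (by omega)]
    ring

lemma pvP_mono (ws : List String) {i j : Nat} (h : i ≤ j) : pvP ws i ≤ pvP ws j := by
  have htt : ws.take i = (ws.take j).take i := by
    rw [List.take_take]; congr 1; omega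
  have hsplit : ws.take i ++ (ws.take j).drop i = ws.take j := by
    rw [htt]; exact List.take_append_drop i (ws.take j)
  have hexp : pvP ws j = pvP ws i + (((ws.take j).drop i).map (fun w => PySem.Str.len w + 1)).sum := by
    rw [pvP, pvP, ← hsplit, List.map_append, List.sum_append, hsplit]
  have hnn : 0 ≤ (((ws.take j).drop i).map (fun w => PySem.Str.len w + 1)).sum := by
    apply List.sum_nonneg
    intro x hx
    simp only [List.mem_map] at hx
    obtain ⟨w, _, rfl⟩ := hx
    have : (0 : Int) ≤ PySem.Str.len w := by simp [PySem.Str.len_eq]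
    omega
  omega

lemma pvP_full (ws : List String) :
    pvP ws ws.length = (ws.map PySem.Str.len).sum + ws.length := by
  induction ws with
  | nil => simp [pvP]
  | cons w r ih =>
    have := pvP_cons w r r.length
    simp only [List.length_cons, this, ih, List.map_cons, List.sum_cons]
    push_cast
    ring

lemma pvP_drop (ws : List String) (m : Nat) (h : m ≤ ws.length) :
    pvP ws ws.length - pvP ws m - 1 = pvLenJ (ws.drop m) := by
  have hexp : pvP ws ws.length = pvP ws m + ((ws.drop m).map (fun w => PySem.Str.len w + 1)).sum := by
    rw [pvP, pvP, List.take_length, ← List.take_append_drop m ws, List.map_append, List.sum_append]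
    simp
  have hsum : ((ws.drop m).map (fun w => PySem.Str.len w + 1)).sum
      = ((ws.drop m).map PySem.Str.len).sum + (ws.drop m).length := by
    induction ws.drop m with
    | nil => simp
    | cons x r ih => simp only [List.map_cons, List.sum_cons, List.length_cons, ih]; push_cast; ring
  rw [hexp, hsum, pvLenJ]
  ring

lemma pvP_succ (ws : List String) (i : Nat) (h : i < ws.length) :
    pvP ws (i + 1) = pvP ws i + (PySem.Str.len ws[i] + 1) := by
  simp only [pvP, List.take_succ, List.getElem?_eq_getElem h, Option.toList_some,
    List.map_append, List.sum_append, List.map_cons, List.map_nil, List.sum_cons, List.sum_nil]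
  ring

-- ---------- strip/append length arithmetic ----------
lemma pvStripAppLen (a b : List Char)
    (ha : ∃ c, a.getLast? = some c ∧ PySem.Chars.isspace c = false)
    (hb : ∃ c, b.getLast? = some c ∧ PySem.Chars.isspace c = false) :
    ((PySem.Chars.strip (a ++ b)).length : Int) = (PySem.Chars.strip a).length + b.length := by
  obtain ⟨ca, hca, hsa⟩ := ha
  obtain ⟨cb, hcb, hsb⟩ := hb
  have hane : a ≠ [] := by rintro rfl; simp at hca
  have hbne : b ≠ [] := by rintro rfl; simp at hcb
  have hdne : a.dropWhile PySem.Chars.isspace ≠ [] := by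
    intro hnil
    have := (List.dropWhile_eq_nil_iff.mp hnil) ca (List.mem_of_getLast? hca)
    rw [hsa] at this; exact Bool.false_ne_true this
  have hdlast : (a.dropWhile PySem.Chars.isspace).getLast? = some ca := by
    obtain ⟨t, ht⟩ := List.dropWhile_suffix (l := a) (p := PySem.Chars.isspace)
    rw [← ht] at hca
    rwa [List.getLast?_append_of_ne_nil _ hdne] at hca
  have hlab : PySem.Chars.lstrip (a ++ b) = a.dropWhile PySem.Chars.isspace ++ b := by
    rw [PySem.Chars.lstrip, List.dropWhile_append, if_neg (by simpa [List.isEmpty_iff] using hdne)]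
  have hrid : ∀ (l : List Char), l.getLast? = some cb →
      PySem.Chars.rstrip l = l := by
    intro l hl
    rw [PySem.Chars.rstrip, pvDropWhileEq, List.reverse_reverse]
    intro c hc
    rw [List.head?_reverse, hl] at hc
    cases hc; exact hsb
  have hstripab : PySem.Chars.strip (a ++ b) = a.dropWhile PySem.Chars.isspace ++ b := by
    rw [PySem.Chars.strip, hlab, hrid]
    rw [List.getLast?_append_of_ne_nil _ hbne, hcb]
  have hstripa : PySem.Chars.strip a = a.dropWhile PySem.Chars.isspace := by
    rw [PySem.Chars.strip, PySem.Chars.lstrip, PySem.Chars.rstrip, pvDropWhileEq, List.reverse_reverse]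
    intro c hc
    rw [List.head?_reverse, hdlast] at hc
    cases hc; exact hsa
  rw [hstripab, hstripa, List.length_append]
  push_cast
  ring

-- ---------- split is invariant under strip, and join(split) is no longer than strip ----------
lemma pvGoLstrip : ∀ (cs : List Char) (acc : List (List Char)),
    PySem.Chars.split₀.go (List.dropWhile PySem.Chars.isspace cs) [] acc
      = PySem.Chars.split₀.go cs [] acc := by
  intro cs
  induction cs with
  | nil => intro acc; simp
  | cons c r ih =>
    intro acc
    by_cases h : PySem.Chars.isspace c
    · rw [List.dropWhile_cons, if_pos h, ih]
      conv_rhs => rw [PySem.Chars.split₀.go]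
      rw [h]
      simp
    · rw [List.dropWhile_cons, if_neg h]

lemma pvGoSpaces : ∀ (t : List Char), (∀ c ∈ t, PySem.Chars.isspace c = true) →
    ∀ cur acc, PySem.Chars.split₀.go t cur acc = PySem.Chars.split₀.go [] cur acc := by
  intro t
  induction t with
  | nil => intro _ cur acc; rfl
  | cons c r ih =>
    intro h cur acc
    have hc : PySem.Chars.isspace c = true := h c (by simp)
    conv_lhs => rw [PySem.Chars.split₀.go]
    rw [hc]
    simp only [if_true]
    by_cases he : cur.isEmpty
    · rw [if_pos he, ih (fun d hd => h d (by simp [hd])) [] acc]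
      conv_lhs => rw [PySem.Chars.split₀.go]
      conv_rhs => rw [PySem.Chars.split₀.go]
      simp [he]
    · rw [if_neg he, ih (fun d hd => h d (by simp [hd])) [] _]
      conv_lhs => rw [PySem.Chars.split₀.go]
      conv_rhs => rw [PySem.Chars.split₀.go]
      simp [he]

lemma pvGoAppendSpaces : ∀ (cs t : List Char), (∀ c ∈ t, PySem.Chars.isspace c = true) →
    ∀ cur acc, PySem.Chars.split₀.go (cs ++ t) cur acc = PySem.Chars.split₀.go cs cur acc := by
  intro cs
  induction cs with
  | nil =>
    intro t h cur acc
    rw [List.nil_append, pvGoSpaces t h]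
  | cons c r ih =>
    intro t h cur acc
    rw [List.cons_append, PySem.Chars.split₀.go, PySem.Chars.split₀.go]
    by_cases hs : PySem.Chars.isspace c <;> simp only [hs, if_true, Bool.false_eq_true, if_false]
    · by_cases he : cur.isEmpty <;> simp only [he, if_true, Bool.false_eq_true, if_false] <;>
        exact ih t h _ _
    · exact ih t h _ _

lemma pvSplitStrip (cs : List Char) :
    PySem.Chars.split₀ (PySem.Chars.strip cs) = PySem.Chars.split₀ cs := by
  unfold PySem.Chars.split₀
  have h1 : PySem.Chars.split₀.go cs [] [] = PySem.Chars.split₀.go (PySem.Chars.lstrip cs) [] [] := by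
    rw [PySem.Chars.lstrip, pvGoLstrip]
  set l := PySem.Chars.lstrip cs with hl
  have hdecomp : l = PySem.Chars.rstrip l ++ (List.takeWhile PySem.Chars.isspace l.reverse).reverse := by
    rw [PySem.Chars.rstrip]
    have := List.takeWhile_append_dropWhile (p := PySem.Chars.isspace) (l := l.reverse)
    calc l = l.reverse.reverse := by rw [List.reverse_reverse]
    _ = (List.takeWhile PySem.Chars.isspace l.reverse ++ List.dropWhile PySem.Chars.isspace l.reverse).reverse := by rw [this]
    _ = _ := by rw [List.reverse_append]
  rw [PySem.Chars.strip, ← hl, h1]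
  conv_rhs => rw [hdecomp]
  rw [pvGoAppendSpaces]
  intro c hc
  rw [List.mem_reverse] at hc
  exact List.mem_takeWhile_imp hc

-- F-invariant: total word length + word count of split is bounded by the input length + 1
def pvF (r : List (List Char)) : Nat := (r.map List.length).sum + r.length

lemma pvF_reverse (r : List (List Char)) : pvF r.reverse = pvF r := by
  simp [pvF]

lemma pvGoF : ∀ (cs cur : List Char) (acc : List (List Char)),
    pvF (PySem.Chars.split₀.go cs cur acc) ≤ pvF acc + cur.length + cs.length + 1 := by
  intro cs
  induction cs with
  | nil =>
    intro cur acc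
    rw [PySem.Chars.split₀.go]
    by_cases he : cur.isEmpty
    · rw [if_pos he, pvF_reverse]; omega
    · rw [if_neg he, pvF_reverse]
      simp [pvF]
      omega
  | cons c r ih =>
    intro cur acc
    rw [PySem.Chars.split₀.go]
    by_cases hs : PySem.Chars.isspace c <;> simp only [hs, if_true, Bool.false_eq_true, if_false]
    · by_cases he : cur.isEmpty <;> simp only [he, if_true, Bool.false_eq_true, if_false]
      · have := ih [] acc; simp at this ⊢; omega
      · have := ih [] (cur.reverse :: acc)
        simp [pvF] at this ⊢
        omega
    · have := ih (c :: cur) acc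
      simp at this ⊢
      omega

lemma pvSumCast (cl : List (List Char)) :
    (cl.map (fun w => (w.length : Int))).sum = ((cl.map List.length).sum : Int) := by
  induction cl with
  | nil => simp
  | cons x r ih => simp only [List.map_cons, List.sum_cons, ih]; push_cast; ring

-- length of a joined string vs pvF of the word list
lemma pvLenJMapOfList (cl : List (List Char)) :
    pvLenJ (cl.map String.ofList) = (pvF cl : Int) - 1 := by
  rw [pvLenJ, pvF]
  have : (cl.map String.ofList).map PySem.Str.len = cl.map (fun w => (w.length : Int)) := by
    rw [List.map_map]
    exact List.map_congr_left (fun x _ => by simp [PySem.Str.len_eq, String.toList_ofList])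
  rw [this, pvSumCast]
  simp

-- ' '.join(second_line.split()) is no longer than second_line.strip()
lemma pvLenJLeStrip (s : String) :
    pvLenJ (PySem.Str.split₀ s) ≤ PySem.Str.len (PySem.Str.strip s) := by
  have hF : pvF (PySem.Chars.split₀ s.toList) ≤ (PySem.Chars.strip s.toList).length + 1 := by
    rw [← pvSplitStrip s.toList]
    have := pvGoF (PySem.Chars.strip s.toList) [] []
    simpa [PySem.Chars.split₀, pvF] using this
  rw [PySem.Str.split₀, pvLenJMapOfList]
  have : PySem.Str.len (PySem.Str.strip s) = ((PySem.Chars.strip s.toList).length : Int) := by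
    simp [PySem.Str.len, PySem.Str.strip, String.toList_ofList]
  rw [this]
  have := hF
  omega

-- ---------- pvRef characterization ----------
def pvFoldApp (fl : String) (ws : List String) : String :=
  ws.foldl (fun a w => a ++ " " ++ w) fl

def pvTest (fl : String) : List String → Prop
  | [] => False
  | w :: rest => PySem.Str.len (PySem.Str.strip (fl ++ " " ++ w)) ≤ 42 ∧
      PySem.Str.len (PySem.Str.strip (fl ++ " " ++ w)) ≤ pvLenJ (w :: rest)

lemma pvFoldAppCons (fl w : String) (ws : List String) :
    pvFoldApp fl (w :: ws) = pvFoldApp (fl ++ " " ++ w) ws := rfl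

lemma pvFoldAppJoin : ∀ (ws : List String) (fl : String), ws ≠ [] →
    pvFoldApp fl ws = fl ++ " " ++ PySem.Str.join " " ws := by
  intro ws
  induction ws with
  | nil => intro fl h; simp at h
  | cons w r ih =>
    intro fl _
    cases r with
    | nil => rw [pvJoinStrSingleton]; rfl
    | cons x r' =>
      rw [pvFoldAppCons, ih _ (by simp), pvJoinStrCons]
      apply pvStrExt
      simp [String.toList_append]

lemma pvRefChar : ∀ (ws : List String) (fl : String), ∃ g, g ≤ ws.length ∧
    pvRef ws fl = (pvFoldApp fl (ws.take g), ws.drop g) ∧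
    (∀ i, i < g → pvTest (pvFoldApp fl (ws.take i)) (ws.drop i)) ∧
    (g < ws.length → ¬ pvTest (pvFoldApp fl (ws.take g)) (ws.drop g)) := by
  intro ws
  induction ws with
  | nil =>
    intro fl
    exact ⟨0, by simp [pvRef, pvFoldApp]⟩
  | cons w rest ih =>
    intro fl
    by_cases hc : pvTest fl (w :: rest)
    · obtain ⟨g', hg1, hg2, hg3, hg4⟩ := ih (fl ++ " " ++ w)
      refine ⟨g' + 1, by simpa using hg1, ?_, ?_, ?_⟩
      · rw [pvRef]
        simp only [pvTest] at hc
        rw [if_pos hc, hg2, List.take_succ_cons, List.drop_succ_cons, pvFoldAppCons]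
      · intro i hi
        cases i with
        | zero => simpa [pvFoldApp] using hc
        | succ i' =>
          rw [List.take_succ_cons, List.drop_succ_cons, pvFoldAppCons]
          exact hg3 i' (by omega)
      · intro hlt
        rw [List.take_succ_cons, List.drop_succ_cons, pvFoldAppCons]
        exact hg4 (by simpa using hlt)
    · refine ⟨0, by omega, ?_, by omega, fun _ => by simpa [pvFoldApp] using hc⟩
      rw [pvRef]
      simp only [pvTest] at hc
      rw [if_neg hc]
      simp [pvFoldApp]

-- ---------- width arithmetic ----------
lemma pvStrLenStrip (x : String) :
    PySem.Str.len (PySem.Str.strip x) = ((PySem.Chars.strip x.toList).length : Int) := by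
  simp [PySem.Str.len, PySem.Str.strip, String.toList_ofList]

lemma pvWordLast (w : String) (h : pvWord w) :
    ∃ c, w.toList.getLast? = some c ∧ PySem.Chars.isspace c = false := by
  obtain ⟨h1, h2⟩ := h
  cases hl : w.toList.getLast? with
  | none => exact absurd (List.getLast?_eq_none_iff.mp hl) h1
  | some c => exact ⟨c, rfl, h2 c (List.mem_of_getLast? hl)⟩

lemma pvJoinStrToList (ws : List String) :
    (PySem.Str.join " " ws).toList = PySem.Chars.join [' '] (ws.map String.toList) := by
  have hsep : (" " : String).toList = [' '] := rfl
  rw [PySem.Str.join, String.toList_ofList, hsep]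

lemma pvJoinWordsLast (ws : List String) (h : ∀ u ∈ ws, pvWord u) (hne : ws ≠ []) :
    ∃ c, (PySem.Str.join " " ws).toList.getLast? = some c ∧ PySem.Chars.isspace c = false := by
  rw [pvJoinStrToList]
  have hcl : ∀ u ∈ ws.map String.toList, u ≠ [] ∧ ∀ c ∈ u, PySem.Chars.isspace c = false := by
    intro u hu
    simp only [List.mem_map] at hu
    obtain ⟨v, hv, rfl⟩ := hu
    exact h v hv
  have hjne : PySem.Chars.join [' '] (ws.map String.toList) ≠ [] := by
    cases hm : ws.map String.toList with
    | nil => exact absurd (List.map_eq_nil_iff.mp hm) hne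
    | cons x r =>
      have hx : x ≠ [] := by
        have hxm : x ∈ ws.map String.toList := by rw [hm]; simp
        exact (hcl x hxm).1
      exact pvJoinNeNil x r hx
  cases hl : (PySem.Chars.join [' '] (ws.map String.toList)).getLast? with
  | none => exact absurd (List.getLast?_eq_none_iff.mp hl) hjne
  | some c => exact ⟨c, rfl, pvJoinLast _ hcl c hl⟩

lemma pvStripAppLenStr (a b : String)
    (ha : ∃ c, a.toList.getLast? = some c ∧ PySem.Chars.isspace c = false)
    (hb : ∃ c, b.toList.getLast? = some c ∧ PySem.Chars.isspace c = false) :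
    PySem.Str.len (PySem.Str.strip (a ++ b))
      = PySem.Str.len (PySem.Str.strip a) + PySem.Str.len b := by
  rw [pvStrLenStrip, pvStrLenStrip, String.toList_append, pvStripAppLen a.toList b.toList ha hb]
  simp [PySem.Str.len_eq]

lemma pvWidthEq (f : String) (ws : List String) (hw : ∀ w ∈ ws, pvWord w)
    (w0 : String) (hh : ws.headD "" = w0) :
    ∀ i, 1 ≤ i → i ≤ ws.length →
    PySem.Str.len (PySem.Str.strip (f ++ " " ++ PySem.Str.join " " (ws.take i)))
      = PySem.Str.len (PySem.Str.strip (f ++ " " ++ w0)) + pvP ws i - pvP ws 1 := by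
  intro i h1
  induction i, h1 using Nat.le_induction with
  | base =>
    intro hle
    cases ws with
    | nil => simp at hle
    | cons v tail =>
      simp only [List.headD_cons] at hh
      subst hh
      rw [show List.take 1 (v :: tail) = [v] by rfl, pvJoinStrSingleton]
      ring
  | succ i hi ih =>
    intro hle
    have hilt : i < ws.length := by omega
    have htake : ws.take (i + 1) = ws.take i ++ [ws[i]] := by
      rw [List.take_succ, List.getElem?_eq_getElem hilt]
      rfl
    have htne : ws.take i ≠ [] := by
      have : (ws.take i).length = i := List.length_take_of_le (by omega)
      intro hnil; rw [hnil] at this; simp at this; omega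
    have hjoin : PySem.Str.join " " (ws.take (i + 1))
        = PySem.Str.join " " (ws.take i) ++ " " ++ ws[i] := by
      rw [htake, pvJoinStrConcat _ _ htne]
    have hsplit : f ++ " " ++ PySem.Str.join " " (ws.take (i + 1))
        = (f ++ " " ++ PySem.Str.join " " (ws.take i)) ++ (" " ++ ws[i]) := by
      rw [hjoin]; apply pvStrExt; simp [String.toList_append]
    have hwi : pvWord ws[i] := hw _ (List.getElem_mem hilt)
    have hb : ∃ c, (" " ++ ws[i]).toList.getLast? = some c ∧ PySem.Chars.isspace c = false := by
      obtain ⟨c, hc1, hc2⟩ := pvWordLast ws[i] hwi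
      refine ⟨c, ?_, hc2⟩
      rw [String.toList_append, List.getLast?_append_of_ne_nil _ hwi.1]
      exact hc1
    have ha : ∃ c, (f ++ " " ++ PySem.Str.join " " (ws.take i)).toList.getLast? = some c ∧
        PySem.Chars.isspace c = false := by
      obtain ⟨c, hc1, hc2⟩ := pvJoinWordsLast (ws.take i)
        (fun u hu => hw u (List.mem_of_mem_take hu)) htne
      have hjnl : (PySem.Str.join " " (ws.take i)).toList ≠ [] := by
        intro hnil; rw [hnil] at hc1; simp at hc1
      refine ⟨c, ?_, hc2⟩
      rw [String.toList_append, List.getLast?_append_of_ne_nil _ hjnl]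
      exact hc1
    have hlen : PySem.Str.len (" " ++ ws[i]) = PySem.Str.len ws[i] + 1 := by
      simp [PySem.Str.len_eq, String.toList_append]
    rw [hsplit, pvStripAppLenStr _ _ ha hb, ih (by omega), hlen,
      pvP_succ ws i hilt]
    ring


-- ---------- binary search correctness ----------
lemma pvBS_eq (fits : Nat → Bool) (K : Nat) :
    ∀ (d lo hi : Nat), hi - lo ≤ d → lo ≤ K → K ≤ hi →
    (∀ i j, 1 ≤ i → i ≤ j → j ≤ hi → fits j = true → fits i = true) →
    (K = 0 ∨ fits K = true) →
    (∀ j, K < j → j ≤ hi → fits j = false) →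
    pvBS fits lo hi = K := by
  intro d
  induction d with
  | zero =>
    intro lo hi h1 h2 h3 _ _ _
    rw [pvBS, if_neg (by omega)]
    omega
  | succ d ih =>
    intro lo hi h1 h2 h3 hmono hK hA
    by_cases hlt : lo < hi
    · rw [pvBS, if_pos hlt]
      have hm1 : lo < (lo + hi + 1) / 2 := by omega
      have hm2 : (lo + hi + 1) / 2 ≤ hi := by omega
      by_cases hf : fits ((lo + hi + 1) / 2) = true
      · rw [if_pos hf]
        have hmK : (lo + hi + 1) / 2 ≤ K := by
          by_contra hc
          have := hA ((lo + hi + 1) / 2) (by omega) (by omega)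
          rw [this] at hf
          exact Bool.false_ne_true hf
        exact ih _ _ (by omega) hmK h3 hmono hK hA
      · rw [if_neg hf]
        have hKm : K ≤ (lo + hi + 1) / 2 - 1 := by
          by_contra hc
          have hKfit : fits K = true := by
            rcases hK with h | h
            · omega
            · exact h
          exact hf (hmono ((lo + hi + 1) / 2) K (by omega) (by omega) (by omega) hKfit)
        refine ih _ _ (by omega) h2 hKm ?_ hK ?_
        · intro i j hi1 hij hj hfj
          exact hmono i j hi1 hij (by omega) hfj
        · intro j hKj hj
          exact hA j hKj (by omega)
    · rw [pvBS, if_neg hlt]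
      omega

-- ===== VERDICT (by name: the statement is the Claim_ definition above) =====
theorem adjust_lines_spec : Claim_equal_adjust_lines := by
  intro f s _
  unfold Spec_adjust_lines
  cases hsp : PySem.Str.split₀ s with
  | nil =>
    simp [adjust_lines, adjust_lines_alt, hsp, pvALoop]
  | cons w rest =>
    have hws : ∀ u ∈ (w :: rest), pvWord u := by rw [← hsp]; exact pvSplitWords s
    have hrest : ∀ u ∈ rest, pvWord u := fun u hu => hws u (by simp [hu])
    -- shorthands (plain abbreviations; proofs below refer to them)
    set nn := (w :: rest).length with hnn
    set pre := (pvPreLoop (w :: rest) [0] 0).1 with hpredef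
    set fwo := PySem.Str.len (PySem.Str.strip (f ++ " " ++ w)) with hfwodef
    set slen := PySem.Str.len (PySem.Str.strip s) with hslendef
    have hpre : ∀ i, i ≤ nn → pre.getD i 0 = pvP (w :: rest) i := fun i hi => pvPreGetD _ i hi
    have hslenJ : pvLenJ (w :: rest) ≤ slen := by rw [hslendef, ← hsp]; exact pvLenJLeStrip s
    have hlenJfull : pvLenJ (w :: rest) = pvP (w :: rest) nn - 1 := by
      rw [pvP_full, pvLenJ]
    have hP0 : pvP (w :: rest) 0 = 0 := by simp [pvP]
    -- width in string form
    have hW : ∀ i, 1 ≤ i → i ≤ nn → pvWidth fwo pre i =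
        PySem.Str.len (PySem.Str.strip (f ++ " " ++ PySem.Str.join " " ((w :: rest).take i))) := by
      intro i h1 h2
      have hwe := pvWidthEq f (w :: rest) hws w rfl i h1 h2
      rw [pvWidth, hpre i h2, hpre 1 (by omega)]
      omega
    have hS0 : pvSource slen pre nn 0 = slen := by simp [pvSource]
    have hSm : ∀ m, 1 ≤ m → m ≤ nn → pvSource slen pre nn m = pvLenJ ((w :: rest).drop m) := by
      intro m h1 h2
      rw [pvSource, if_neg (by omega), hpre nn le_rfl, hpre m h2]
      rw [hnn] at h2 ⊢
      exact pvP_drop _ m h2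
    have hSbound : ∀ m, m ≤ nn → pvSource slen pre nn m ≤ slen := by
      intro m hm
      by_cases h0 : m = 0
      · rw [h0, hS0]
      · rw [pvSource, if_neg h0, hpre nn le_rfl, hpre m hm]
        have hmono := pvP_mono (w :: rest) (Nat.zero_le m)
        rw [hP0] at hmono
        omega
    have hSmono : ∀ m m', m' ≤ m → m ≤ nn → pvSource slen pre nn m ≤ pvSource slen pre nn m' := by
      intro m m' hmm hm
      by_cases h0 : m' = 0
      · rw [h0, hS0]; exact hSbound m hm
      · rw [pvSource, pvSource, if_neg h0, if_neg (by omega), hpre m hm, hpre m' (by omega)]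
        have := pvP_mono (w :: rest) hmm
        omega
    have hWmono : ∀ i j, 1 ≤ i → i ≤ j → j ≤ nn → pvWidth fwo pre i ≤ pvWidth fwo pre j := by
      intro i j h1 hij hj
      rw [pvWidth, pvWidth, hpre i (le_trans hij hj), hpre j hj]
      have := pvP_mono (w :: rest) hij
      omega
    have hmonoF : ∀ i j, 1 ≤ i → i ≤ j → j ≤ nn →
        pvFits fwo slen pre nn j = true → pvFits fwo slen pre nn i = true := by
      intro i j h1 hij hj hfj
      rw [pvFits] at hfj ⊢
      simp only [Bool.and_eq_true, decide_eq_true_eq] at hfj ⊢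
      obtain ⟨hf1, hf2⟩ := hfj
      refine ⟨le_trans (hWmono i j h1 hij hj) hf1, ?_⟩
      exact le_trans (hWmono i j h1 hij hj) (le_trans hf2 (hSmono (j - 1) (i - 1) (by omega) (by omega)))
    have hfits : ∀ i, 1 ≤ i → i ≤ nn → (pvFits fwo slen pre nn i = true ↔
        (PySem.Str.len (PySem.Str.strip (f ++ " " ++ PySem.Str.join " " ((w :: rest).take i))) ≤ 42 ∧
         PySem.Str.len (PySem.Str.strip (f ++ " " ++ PySem.Str.join " " ((w :: rest).take i)))
           ≤ pvSource slen pre nn (i - 1))) := by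
      intro i h1 h2
      rw [pvFits]
      simp only [Bool.and_eq_true, decide_eq_true_eq]
      rw [hW i h1 h2]
    have hfits1 : pvFits fwo slen pre nn 1 = true ↔ (fwo ≤ 42 ∧ fwo ≤ slen) := by
      rw [hfits 1 (by omega) (by simp [hnn])]
      rw [show (w :: rest).take 1 = [w] from rfl, pvJoinStrSingleton,
        show (1 - 1 : Nat) = 0 from rfl, hS0, hfwodef]
    -- reduce A to its loop
    have hA : adjust_lines f s
        = (PySem.Str.strip (pvALoop (w :: rest) f s (w :: rest)).1,
           PySem.Str.strip (pvALoop (w :: rest) f s (w :: rest)).2) := by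
      simp only [adjust_lines, hsp]
    -- reduce B
    have hB : adjust_lines_alt f s
        = (if pvBS (pvFits fwo slen pre nn) 0 nn = 0 then
             (PySem.Str.strip f, PySem.Str.strip s)
           else
             (PySem.Str.strip (f ++ " " ++ PySem.Str.join " "
                ((w :: rest).take (pvBS (pvFits fwo slen pre nn) 0 nn))),
              PySem.Str.join " " ((w :: rest).drop (pvBS (pvFits fwo slen pre nn) 0 nn)))) := by
      simp only [adjust_lines_alt, hsp, List.isEmpty_cons, List.headD_cons]
      rw [← hpredef, ← hfwodef, ← hslendef, ← hnn]
      simp only [Bool.false_eq_true, if_false]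
    by_cases hC0 : fwo ≤ 42 ∧ fwo ≤ slen
    · -- first word moves; A runs pvRef on the tail
      have hslice : PySem.List.slice (w :: rest) (some 1) none = rest := by simp [pysem]
      have hAloop : pvALoop (w :: rest) f s (w :: rest)
          = ((pvRef rest (f ++ " " ++ w)).1, PySem.Str.join " " (pvRef rest (f ++ " " ++ w)).2) := by
        rw [pvALoop]
        simp only [← hfwodef, ← hslendef]
        rw [if_pos hC0, hslice, pvJoinSplit rest hrest]
        exact pvALoopRef rest hrest (f ++ " " ++ w)
      obtain ⟨g', hg1, hg2, hg3, hg4⟩ := pvRefChar rest (f ++ " " ++ w)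
      -- translation: greedy test at tail index j = fits (j+2)
      have htrans : ∀ j, j < rest.length →
          (pvTest (pvFoldApp (f ++ " " ++ w) (rest.take j)) (rest.drop j) ↔
           pvFits fwo slen pre nn (j + 2) = true) := by
        intro j hj
        have hjlt : j + 1 < (w :: rest).length := by simp; omega
        have hgetel : (w :: rest)[j + 1] = rest[j] := by simp
        have htk1 : (w :: rest).take (j + 2) = (w :: rest).take (j + 1) ++ [rest[j]] := by
          rw [List.take_succ, List.getElem?_eq_getElem hjlt, hgetel]
          rfl
        have htne : (w :: rest).take (j + 1) ≠ [] := by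
          intro hnil
          have := congrArg List.length hnil
          rw [List.length_take_of_le (by simp; omega)] at this
          simp at this
        have hfoldtake : pvFoldApp (f ++ " " ++ w) (rest.take j)
            = pvFoldApp f ((w :: rest).take (j + 1)) := by
          rw [List.take_succ_cons, pvFoldAppCons]
        have hfl : pvFoldApp (f ++ " " ++ w) (rest.take j) ++ " " ++ rest[j]
            = f ++ " " ++ PySem.Str.join " " ((w :: rest).take (j + 2)) := by
          rw [hfoldtake, pvFoldAppJoin _ _ htne, htk1, pvJoinStrConcat _ _ htne]
          apply pvStrExt
          simp [String.toList_append]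
        have hdropc : rest.drop j = rest[j] :: rest.drop (j + 1) := List.drop_eq_getElem_cons hj
        have hlenj : pvLenJ (rest[j] :: rest.drop (j + 1)) = pvSource slen pre nn (j + 1) := by
          rw [← hdropc, show rest.drop j = (w :: rest).drop (j + 1) from rfl,
            ← hSm (j + 1) (by omega) (by simp [hnn]; omega)]
        rw [hdropc]
        show (PySem.Str.len (PySem.Str.strip (pvFoldApp (f ++ " " ++ w) (rest.take j) ++ " " ++ rest[j])) ≤ 42 ∧
              PySem.Str.len (PySem.Str.strip (pvFoldApp (f ++ " " ++ w) (rest.take j) ++ " " ++ rest[j]))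
                ≤ pvLenJ (rest[j] :: rest.drop (j + 1))) ↔ _
        rw [hfl, hlenj, hfits (j + 2) (by omega) (by simp [hnn]; omega),
          show (j + 2 - 1 : Nat) = j + 1 from rfl]
      have hQ : ∀ i, 1 ≤ i → i ≤ g' + 1 → pvFits fwo slen pre nn i = true := by
        intro i h1 h2
        match i, h1 with
        | 1, _ => exact hfits1.mpr hC0
        | (j + 2), _ =>
          exact (htrans j (by omega)).mp (hg3 j (by omega))
      have hQstop : g' < rest.length → pvFits fwo slen pre nn (g' + 2) = false := by
        intro hlt
        have hnt := hg4 hlt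
        rw [Bool.eq_false_iff]
        intro hb
        exact hnt ((htrans g' hlt).mpr hb)
      have hK : pvBS (pvFits fwo slen pre nn) 0 nn = g' + 1 := by
        apply pvBS_eq _ _ nn 0 nn (by omega) (by omega) (by simp [hnn]; omega) hmonoF
        · exact Or.inr (hQ (g' + 1) (by omega) (by omega))
        · intro j hj1 hj2
          have hglt : g' < rest.length := by simp [hnn] at hj2; omega
          rw [Bool.eq_false_iff]
          intro hb
          have := hmonoF (g' + 2) j (by omega) (by omega) hj2 hb
          rw [hQstop hglt] at this
          exact Bool.false_ne_true this
      have htgne : (w :: rest).take (g' + 1) ≠ [] := by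
        intro hnil
        have := congrArg List.length hnil
        rw [List.length_take_of_le (by simp; omega)] at this
        simp at this
      rw [hA, hAloop, hg2, hB, hK]
      rw [if_neg (by omega)]
      have hfirst : (pvRef rest (f ++ " " ++ w)).1 = pvFoldApp (f ++ " " ++ w) (rest.take g') := by
        rw [hg2]
      have hfold : pvFoldApp (f ++ " " ++ w) (rest.take g')
          = f ++ " " ++ PySem.Str.join " " ((w :: rest).take (g' + 1)) := by
        rw [List.take_succ_cons, ← pvFoldAppCons, pvFoldAppJoin _ _ (by simp)]
      have hdropg : rest.drop g' = (w :: rest).drop (g' + 1) := rfl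
      have hdropw : ∀ u ∈ (w :: rest).drop (g' + 1), pvWord u :=
        fun u hu => hws u (List.mem_of_mem_drop hu)
      simp only [hfold, hdropg]
      rw [pvStripJoin _ hdropw]
    · -- the first word does not move: A breaks immediately, B finds k = 0
      have hAloop : pvALoop (w :: rest) f s (w :: rest) = (f, s) := by
        rw [pvALoop]
        simp only [← hfwodef, ← hslendef]
        rw [if_neg hC0]
      have hK : pvBS (pvFits fwo slen pre nn) 0 nn = 0 := by
        apply pvBS_eq _ _ nn 0 nn (by omega) (by omega) (by omega) hmonoF (Or.inl rfl)
        intro j hj1 hj2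
        rw [Bool.eq_false_iff]
        intro hb
        exact hC0 (hfits1.mp (hmonoF 1 j (by omega) (by omega) hj2 hb))
      rw [hA, hAloop, hB, hK, if_pos rfl]
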